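-- pv_equiv track=rewrite | github.com/BWSI-RACECAR/code-clash-09-KSO2525 | licenseplate.py | licensePlate
-- ===== SOURCE A (Python) =====
-- def licensePlate(str):
--     # type str: string
--     # return: int
--     comb = 1
--     alph = 0
--     num = 0
--     # TODO: Write code below to return an int with the solution to the prompt
--     for i in range(len(str)):
--         if str[i] == ".":
--             if i < 3:
--                 alph += 1
--             elif i >= 3:
--                 num += 1
--     if num != 0:
--         temp = 10-(4-num)
--         for i in range(num):
--             comb = comb * temp
--             temp -= 1
--     if alph != 0:
--         temp = 10-(3-alph)
--         for i in range(alph):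
--             comb = comb * temp
--             temp -= 1
--     return comb
-- ===== SOURCE B (Python) =====
-- def licensePlate(str):
--     # Simpler: slice counts for the two dot groups, recursive falling-factorial
--     # instead of A's index loop with branches and two guarded product loops.
--     def fall(n, k):
--         return 1 if k == 0 else n * fall(n - 1, k - 1)
--     alph = str[:3].count('.')
--     num = str[3:].count('.')
--     return fall(6 + num, num) * fall(7 + alph, alph)
-- ===== Notes on version B (the rewrite author's own statement) =====
-- stated objective: simpler
-- what changed: Replaces the index loop with positional branches by two slice dot-counts and the two guarded mutable product loops by one recursive falling-factorial helper (perm(6+num,num)*perm(7+alph,alph)); the num!=0/alph!=0 guards disappear since fall(n,0)=1.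
import Mathlib
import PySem

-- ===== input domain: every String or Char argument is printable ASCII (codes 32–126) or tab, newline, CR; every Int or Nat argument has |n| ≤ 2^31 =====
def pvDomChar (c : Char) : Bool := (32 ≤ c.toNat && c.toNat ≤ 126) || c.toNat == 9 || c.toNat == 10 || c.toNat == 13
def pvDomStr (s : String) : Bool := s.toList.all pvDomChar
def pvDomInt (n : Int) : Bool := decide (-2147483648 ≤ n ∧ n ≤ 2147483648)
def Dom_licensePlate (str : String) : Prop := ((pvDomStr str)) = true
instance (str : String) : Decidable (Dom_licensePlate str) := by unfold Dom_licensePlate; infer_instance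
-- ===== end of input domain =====

-- B replaces A's index loop and two guarded product loops by two slice counts and a recursive falling-factorial helper; objective: simpler, same cost.


-- ===== PORT A =====
def licensePlate (str : String) : Int :=
  let comb : Int := 1
  let an : Int × Int :=
    (PySem.List.pyRange 0 (PySem.Str.len str) 1).foldl
      (fun (p : Int × Int) i =>
        if PySem.List.pyGetD str.toList i ' ' = '.' then
          if i < 3 then (p.1 + 1, p.2)
          else if 3 ≤ i then (p.1, p.2 + 1)
          else p
        else p) (0, 0)
  let alph := an.1
  let num := an.2
  let comb : Int :=
    if num ≠ 0 then
      ((PySem.List.pyRange 0 num 1).foldl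
        (fun (q : Int × Int) _ => (q.1 * q.2, q.2 - 1)) (comb, 10 - (4 - num))).1
    else comb
  let comb : Int :=
    if alph ≠ 0 then
      ((PySem.List.pyRange 0 alph 1).foldl
        (fun (q : Int × Int) _ => (q.1 * q.2, q.2 - 1)) (comb, 10 - (3 - alph))).1
    else comb
  comb

-- ===== PORT B =====
-- fall(n, k) from Source B: the falling factorial n·(n-1)·…·(n-k+1), recursively
def fallB (n : Int) (k : Nat) : Int :=
  match k with
  | 0 => 1
  | k + 1 => n * fallB (n - 1) k

def licensePlate_alt (str : String) : Int :=
  let alph : Nat := PySem.Str.count (PySem.Str.slice str none (some 3)) "."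
  let num : Nat := PySem.Str.count (PySem.Str.slice str (some 3) none) "."
  fallB (6 + (num : Int)) num * fallB (7 + (alph : Int)) alph

-- ===== PRECONDITION & SPEC =====
def Spec_licensePlate (str : String) (out : Int) : Prop := out = licensePlate_alt str
instance (str : String) (out : Int) : Decidable (Spec_licensePlate str out) := by unfold Spec_licensePlate; infer_instance

-- ===== CLAIM (what is proved, stated in full; the proofs are below) =====
def Claim_equal_licensePlate : Prop := ∀ (str : String), Dom_licensePlate str → Spec_licensePlate str (licensePlate str)

-- ===== LEMMAS AND PROOFS =====


theorem charsCountGo_single (c : Char) :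
    ∀ (l : List Char) (fuel acc : Nat), l.length ≤ fuel →
      PySem.Chars.count.go [c] fuel l acc = acc + l.count c := by
  intro l
  induction l with
  | nil => intro fuel acc _; cases fuel <;> simp [PySem.Chars.count.go]
  | cons h t ih =>
      intro fuel acc hle
      cases fuel with
      | zero => simp only [List.length_cons] at hle; omega
      | succ f =>
          have hf : t.length ≤ f := by simp only [List.length_cons] at hle; omega
          simp only [PySem.Chars.count.go]
          by_cases hc : h = c
          · have hp : [c].isPrefixOf (h :: t) = true := by simp [hc]
            simp only [hp, if_pos, List.length_singleton, List.drop_succ_cons, List.drop_zero]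
            rw [ih f (acc + 1) hf]
            simp [hc]
            omega
          · have hp : [c].isPrefixOf (h :: t) = false := by
              simp [List.isPrefixOf]; exact fun hh => (hc hh.symm).elim
            simp only [hp, Bool.false_eq_true, if_false]
            rw [ih f acc hf]
            simp [List.count_cons]
            intro hh; exact (hc hh).elim

theorem charsCount_single (l : List Char) (c : Char) :
    PySem.Chars.count l [c] = l.count c := by
  simp [PySem.Chars.count, charsCountGo_single c l l.length 0 le_rfl]

theorem prodLoop (l : List Int) (c t : Int) :
    (l.foldl (fun (q : Int × Int) _ => (q.1 * q.2, q.2 - 1)) (c, t))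
      = (c * fallB t l.length, t - l.length) := by
  induction l generalizing c t with
  | nil => simp [fallB]
  | cons x xs ih =>
      simp only [List.foldl_cons, ih, List.length_cons, fallB, Prod.mk.injEq]
      constructor
      · ring
      · push_cast; ring

theorem countSingleton (k : Nat) (x : Char) (hx : x ≠ '.') :
    List.count '.' (List.take k [x]) = 0 ∧ List.count '.' (List.drop k [x]) = 0 := by
  cases k <;> simp [hx]

theorem countLoop (cs : List Char) :
    ∀ (n : Nat), n ≤ cs.length →
      (((List.range n).map (fun (k : Nat) => (k : Int))).foldl
        (fun (p : Int × Int) i =>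
          if PySem.List.pyGetD cs i ' ' = '.' then
            if i < 3 then (p.1 + 1, p.2)
            else if 3 ≤ i then (p.1, p.2 + 1)
            else p
          else p) (0, 0))
      = ((((cs.take n).take 3).count '.' : Int), (((cs.take n).drop 3).count '.' : Int)) := by
  intro n
  induction n with
  | zero => intro _; simp
  | succ m ih =>
      intro hle
      have hm : m < cs.length := by omega
      rw [List.range_succ, List.map_append, List.foldl_append, ih (by omega)]
      have htake : cs.take (m + 1) = cs.take m ++ [cs[m]] := by
        rw [List.take_add_one]
        simp [List.getElem?_eq_getElem hm]
      have hget : PySem.List.pyGetD cs (m : Int) ' ' = cs[m] := by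
        rw [PySem.List.pyGetD_natCast]
        simp [List.getElem?_eq_getElem hm]
      have hlen : (cs.take m).length = m := by simp [Nat.le_of_lt hm]
      simp only [List.map_cons, List.map_nil, List.foldl_cons, List.foldl_nil, hget]
      rw [htake, List.take_append, List.drop_append, hlen]
      by_cases hdot : cs[m] = '.'
      · rw [hdot, if_pos rfl]
        by_cases h3 : m < 3
        · have hi : (m : Int) < 3 := by exact_mod_cast h3
          rw [if_pos hi]
          have h1 : List.take (3 - m) ['.'] = ['.'] := by
            apply List.take_of_length_le; simp; omega
          have h2 : List.drop (3 - m) ['.'] = [] := by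
            apply List.drop_eq_nil_of_le; simp; omega
          simp [h1, h2, List.count_append]
        · have hi : ¬ ((m : Int) < 3) := fun h => h3 (by exact_mod_cast h)
          have hi' : (3 : Int) ≤ (m : Int) := by exact_mod_cast Nat.le_of_not_lt h3
          rw [if_neg hi, if_pos hi']
          have h1 : List.take (3 - m) ['.'] = [] := by
            simp [Nat.sub_eq_zero_of_le (Nat.le_of_not_lt h3)]
          have h2 : List.drop (3 - m) ['.'] = ['.'] := by
            simp [Nat.sub_eq_zero_of_le (Nat.le_of_not_lt h3)]
          simp [h1, h2, List.count_append]
      · rw [if_neg hdot]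
        have := countSingleton (3 - m) cs[m] hdot
        simp [List.count_append, this.1, this.2]

theorem prodGen (k : Nat) (c t : Int) :
    ((PySem.List.pyRange 0 (k : Int) 1).foldl
      (fun (q : Int × Int) _ => (q.1 * q.2, q.2 - 1)) (c, t)).1 = c * fallB t k := by
  rw [prodLoop]
  simp [PySem.List.length_pyRange_one]

-- A's output equals B's output, for every string
theorem licensePlate_eq (str : String) : licensePlate str = licensePlate_alt str := by
  unfold licensePlate licensePlate_alt
  have s1 : PySem.List.slice str.toList none (some (3 : Int)) = str.toList.take 3 := by
    rw [PySem.List.slice_to str.toList (by norm_num : (0:Int) ≤ 3)]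
    simp
  have s2 : PySem.List.slice str.toList (some (3 : Int)) none = str.toList.drop 3 := by
    rw [PySem.List.slice_from str.toList (by norm_num : (0:Int) ≤ 3)]
    simp
  simp only [PySem.Str.count_eq, PySem.Str.toList_slice, PySem.Chars.slice_eq_listSlice,
    s1, s2, show ".".toList = ['.'] from rfl, charsCount_single]
  set cs := str.toList with hcs
  have hlen : PySem.Str.len str = (cs.length : Int) := by
    simp [PySem.Str.len_eq, hcs]
  rw [hlen, PySem.List.pyRange_one]
  have hcount := countLoop cs cs.length le_rfl
  rw [List.take_length] at hcount
  simp only [Int.sub_zero, Int.toNat_natCast, zero_add] at hcount ⊢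
  rw [hcount]
  set A : Nat := (cs.take 3).count '.' with hA
  set N : Nat := (cs.drop 3).count '.' with hN
  rw [show (10 : Int) - (4 - (N : Int)) = 6 + (N : Int) from by ring,
      show (10 : Int) - (3 - (A : Int)) = 7 + (A : Int) from by ring]
  split_ifs with h1 h2 h3
  · rw [prodGen, prodGen]; ring
  · have : N = 0 := by have hx := of_not_not h2; simp only [] at hx; exact_mod_cast hx
    rw [prodGen, this]
    simp [fallB]
  · have : A = 0 := by have hx := of_not_not h1; simp only [] at hx; exact_mod_cast hx
    rw [prodGen, this]
    simp [fallB]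
  · have hA0 : A = 0 := by have hx := of_not_not h1; simp only [] at hx; exact_mod_cast hx
    have hN0 : N = 0 := by have hx := of_not_not h3; simp only [] at hx; exact_mod_cast hx
    rw [hA0, hN0]
    simp [fallB]

-- ===== VERDICT (by name: the statement is the Claim_ definition above) =====
theorem licensePlate_spec : Claim_equal_licensePlate := by
  intro str _
  unfold Spec_licensePlate
  exact licensePlate_eq str
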